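-- pv_equiv track=rewrite | github.com/lcjs2/SimpleTicker | timeseries_utility.py | parse_line_pairs
-- ===== SOURCE A (Python) =====
-- def next_word(line):
--     out=line.split(" ",1)
--     while(len(out)<2): out.append('') #Always return two (possibly empty) things
--     return out
--
-- def parse_line_pairs(line):
--     #Return a list of word pairs x=y
--     pairs={}
--     while(line):
--         word, line=next_word(line)
--         if('=' in word):
--             pair=word.split("=")
--             pairs[pair[0]]=pair[1]
--     return pairs
-- ===== SOURCE B (Python) =====
-- def parse_line_pairs(line):
--     #Return a list of word pairs x=y
--     pairs = {}
--     for word in line.split(" "):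
--         if '=' in word:
--             parts = word.split("=")
--             pairs[parts[0]] = parts[1]
--     return pairs
-- ===== Notes on version B (the rewrite author's own statement) =====
-- stated objective: simpler
-- what changed: Replaces A's repeated consume-the-remainder loop (next_word splitting the shrinking string with split(' ',1) each iteration) by a single line.split(' ') tokenization followed by one flat loop over the tokens.
import Mathlib
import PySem

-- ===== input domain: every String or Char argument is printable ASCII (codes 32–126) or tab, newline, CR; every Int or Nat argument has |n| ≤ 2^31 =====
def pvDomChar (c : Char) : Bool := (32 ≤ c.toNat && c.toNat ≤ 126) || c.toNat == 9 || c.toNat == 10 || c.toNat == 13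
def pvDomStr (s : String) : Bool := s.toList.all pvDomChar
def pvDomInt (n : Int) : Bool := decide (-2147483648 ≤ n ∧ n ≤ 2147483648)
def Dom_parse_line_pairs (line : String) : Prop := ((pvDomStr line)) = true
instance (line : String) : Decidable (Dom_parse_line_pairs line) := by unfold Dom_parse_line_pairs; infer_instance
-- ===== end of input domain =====

-- B replaces A's repeated split-the-remainder consumption loop by one split(" ") pass plus a flat
-- loop over the tokens (objective: simpler); return values agree on every input.

-- ===== PORT A =====
-- while(len(out)<2): out.append('')
def pvPadA (out : List String) : List String :=
  if out.length < 2 then pvPadA (out ++ [""]) else out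
  termination_by 2 - out.length
  decreasing_by simp at *; omega

-- def next_word(line): out=line.split(" ",1); while(len(out)<2): out.append(''); return out
def next_word (line : String) : List String :=
  pvPadA ((PySem.Str.splitMax? line " " 1).getD [])

-- the while(line) loop of A; fuel is a totality guard only (line shrinks every iteration,
-- so the initial fuel length+1 is never exhausted — proved in the lemmas below)
def pvLoopA (fuel : Nat) (pairs : PySem.Dict String String) (line : String) :
    PySem.Dict String String :=
  match fuel with
  | 0 => pairs
  | fuel + 1 =>
    if line = "" then pairs
    else
      let out := next_word line
      let word := out.getD 0 ""
      let rest := out.getD 1 ""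
      let pairs' :=
        if PySem.Str.isIn "=" word then
          let pair := (PySem.Str.split? word "=").getD []
          pairs.insert ((PySem.List.pyGet? pair 0).getD "") ((PySem.List.pyGet? pair 1).getD "")
        else pairs
      pvLoopA fuel pairs' rest

def parse_line_pairs (line : String) : List (String × String) :=
  (pvLoopA (line.toList.length + 1) PySem.Dict.empty line).items

-- ===== PORT B =====
def parse_line_pairs_alt (line : String) : List (String × String) :=
  let tokens := (PySem.Str.split? line " ").getD []
  (tokens.foldl
    (fun pairs word =>
      if PySem.Str.isIn "=" word then
        let parts := (PySem.Str.split? word "=").getD []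
        pairs.insert ((PySem.List.pyGet? parts 0).getD "") ((PySem.List.pyGet? parts 1).getD "")
      else pairs)
    PySem.Dict.empty).items

-- ===== PRECONDITION & SPEC =====
def Spec_parse_line_pairs (line : String) (out : List (String × String)) : Prop := out = parse_line_pairs_alt line
instance (line : String) (out : List (String × String)) : Decidable (Spec_parse_line_pairs line out) := by unfold Spec_parse_line_pairs; infer_instance

-- ===== CLAIM (what is proved, stated in full; the proofs are below) =====
def Claim_equal_parse_line_pairs : Prop := ∀ (line : String), Dom_parse_line_pairs line → Spec_parse_line_pairs line (parse_line_pairs line)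

-- ===== LEMMAS AND PROOFS =====

-- the shared loop body of both ports
def pvStep (pairs : PySem.Dict String String) (word : String) : PySem.Dict String String :=
  if PySem.Str.isIn "=" word then
    let pair := (PySem.Str.split? word "=").getD []
    pairs.insert ((PySem.List.pyGet? pair 0).getD "") ((PySem.List.pyGet? pair 1).getD "")
  else pairs

-- prepend to the head piece (the split loops' accumulator shape)
def pvConsPre (p : List Char) : List (List Char) → List (List Char)
  | [] => [p]
  | h :: t => (p ++ h) :: t

-- structural model of line.split(" ", 1)
def pvSp1 : List Char → List (List Char)
  | [] => [[]]
  | c :: rest => if c = ' ' then [[], rest] else pvConsPre [c] (pvSp1 rest)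

-- structural model of line.split(" ")
def pvSplitAll : List Char → List (List Char)
  | [] => [[]]
  | c :: rest => if c = ' ' then [] :: pvSplitAll rest else pvConsPre [c] (pvSplitAll rest)

theorem pvConsPre_ne_nil (p : List Char) (xs : List (List Char)) : pvConsPre p xs ≠ [] := by
  cases xs <;> simp [pvConsPre]

theorem pvSp1_ne_nil (l : List Char) : pvSp1 l ≠ [] := by
  cases l with
  | nil => simp [pvSp1]
  | cons c rest =>
    simp only [pvSp1]
    split
    · simp
    · exact pvConsPre_ne_nil _ _

theorem pvSplitAll_ne_nil (l : List Char) : pvSplitAll l ≠ [] := by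
  cases l with
  | nil => simp [pvSplitAll]
  | cons c rest =>
    simp only [pvSplitAll]
    split
    · simp
    · exact pvConsPre_ne_nil _ _

theorem pvConsPre_nil (xs : List (List Char)) (h : xs ≠ []) : pvConsPre [] xs = xs := by
  cases xs with
  | nil => exact absurd rfl h
  | cons a t => simp [pvConsPre]

theorem pvConsPre_pvConsPre (p q : List Char) (xs : List (List Char)) (h : xs ≠ []) :
    pvConsPre p (pvConsPre q xs) = pvConsPre (p ++ q) xs := by
  cases xs with
  | nil => exact absurd rfl h
  | cons a t => simp [pvConsPre]

-- shape of a maxsplit-1 split: either no space, or the first-space decomposition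
theorem pvSp1_spec (l : List Char) :
    pvSp1 l = [l] ∨ ∃ w r, pvSp1 l = [w, r] ∧ l = w ++ ' ' :: r := by
  induction l with
  | nil => left; rfl
  | cons c rest ih =>
    by_cases hc : c = ' '
    · right; exact ⟨[], rest, by simp [pvSp1, hc], by simp [hc]⟩
    · rcases ih with h1 | ⟨w, r, h2, hdec⟩
      · left; simp [pvSp1, hc, h1, pvConsPre]
      · right
        exact ⟨c :: w, r, by simp [pvSp1, hc, h2, pvConsPre], by simp [hdec]⟩

-- relation between the full split and the maxsplit-1 split
theorem pvSplitAll_of_pvSp1 (l : List Char) :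
    (∀ w, pvSp1 l = [w] → pvSplitAll l = [w]) ∧
    (∀ w r, pvSp1 l = [w, r] → pvSplitAll l = w :: pvSplitAll r) := by
  induction l with
  | nil =>
    constructor
    · intro w h; simp [pvSp1] at h; simp [pvSplitAll, h]
    · intro w r h; simp [pvSp1] at h
  | cons c rest ih =>
    by_cases hc : c = ' '
    · constructor
      · intro w h; simp [pvSp1, hc] at h
      · intro w r h
        simp [pvSp1, hc] at h
        simp [pvSplitAll, hc, h.1, h.2]
    · rcases pvSp1_spec rest with h1 | ⟨w', r', h2, _⟩
      · constructor
        · intro w h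
          simp [pvSp1, hc, h1, pvConsPre] at h
          simp [pvSplitAll, hc, ih.1 rest h1, pvConsPre, h]
        · intro w r h
          simp [pvSp1, hc, h1, pvConsPre] at h
      · constructor
        · intro w h
          simp [pvSp1, hc, h2, pvConsPre] at h
        · intro w r h
          simp [pvSp1, hc, h2, pvConsPre] at h
          rw [pvSplitAll, if_neg hc, ih.2 w' r' h2, ← h.2]
          simp [pvConsPre, h.1]

-- the fuel-based go of splitOnMax with maxsplit exhausted returns the remainder as one piece
theorem pv_go_zero (fuel : Nat) (l cur : List Char) (acc : List (List Char)) :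
    PySem.Chars.splitOnMax.go [' '] fuel 0 l cur acc = ((cur.reverse ++ l) :: acc).reverse := by
  cases fuel with
  | zero => rfl
  | succ fuel =>
    cases l with
    | nil => simp [PySem.Chars.splitOnMax.go]
    | cons c rest => simp [PySem.Chars.splitOnMax.go]

theorem pv_go_one (fuel : Nat) (l : List Char) (h : l.length < fuel) (cur : List Char)
    (acc : List (List Char)) :
    PySem.Chars.splitOnMax.go [' '] fuel 1 l cur acc =
      acc.reverse ++ pvConsPre cur.reverse (pvSp1 l) := by
  induction fuel generalizing l cur acc with
  | zero => omega
  | succ fuel ih =>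
    cases l with
    | nil => simp [PySem.Chars.splitOnMax.go, pvSp1, pvConsPre]
    | cons c rest =>
      by_cases hc : c = ' '
      · subst hc
        simp [PySem.Chars.splitOnMax.go, List.isPrefixOf, pv_go_zero, pvSp1, pvConsPre]
      · have hpre : [' '].isPrefixOf (c :: rest) = false := by
          simp [List.isPrefixOf]; exact fun h => absurd h.symm hc
        simp only [PySem.Chars.splitOnMax.go, hpre]
        rw [if_neg (by omega : ¬ (1 : Nat) = 0)] at *
        simp only [Bool.false_eq_true, if_false]
        rw [ih rest (by simp at h; omega) (c :: cur) acc]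
        rw [pvSp1, if_neg hc, pvConsPre_pvConsPre _ _ _ (pvSp1_ne_nil rest)]
        simp

theorem pv_goOn (fuel : Nat) (l : List Char) (h : l.length < fuel) (cur : List Char)
    (acc : List (List Char)) :
    PySem.Chars.splitOn.go [' '] fuel l cur acc =
      acc.reverse ++ pvConsPre cur.reverse (pvSplitAll l) := by
  induction fuel generalizing l cur acc with
  | zero => omega
  | succ fuel ih =>
    cases l with
    | nil => simp [PySem.Chars.splitOn.go, pvSplitAll, pvConsPre]
    | cons c rest =>
      by_cases hc : c = ' '
      · subst hc
        simp only [PySem.Chars.splitOn.go, List.isPrefixOf]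
        rw [if_pos (by rfl)]
        simp only [List.length_cons, List.length_nil, List.drop_succ_cons, List.drop_zero]
        rw [ih rest (by simp at h; omega) [] (cur.reverse :: acc)]
        simp only [List.reverse_nil]
        rw [pvConsPre_nil _ (pvSplitAll_ne_nil rest)]
        simp [pvSplitAll, pvConsPre]
      · have hpre : [' '].isPrefixOf (c :: rest) = false := by
          simp [List.isPrefixOf]; exact fun h => absurd h.symm hc
        simp only [PySem.Chars.splitOn.go, hpre, Bool.false_eq_true, if_false]
        rw [ih rest (by simp at h; omega) (c :: cur) acc]
        rw [pvSplitAll, if_neg hc, pvConsPre_pvConsPre _ _ _ (pvSplitAll_ne_nil rest)]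
        simp

theorem pv_splitMax_eq (line : String) :
    PySem.Str.splitMax? line " " 1 = some ((pvSp1 line.toList).map String.ofList) := by
  have key : PySem.Chars.splitMax? line.toList [' '] 1 =
      some (PySem.Chars.splitOnMax.go [' '] (line.toList.length + 1) 1 line.toList [] []) := rfl
  show Option.map _ (PySem.Chars.splitMax? line.toList " ".toList 1) = _
  rw [show (" ".toList) = [' '] from rfl, key,
    pv_go_one (line.toList.length + 1) line.toList (by omega) [] []]
  simp [pvConsPre_nil _ (pvSp1_ne_nil line.toList)]

theorem pv_split_eq (line : String) :
    PySem.Str.split? line " " = some ((pvSplitAll line.toList).map String.ofList) := by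
  have key : PySem.Chars.split? line.toList [' '] =
      some (PySem.Chars.splitOn.go [' '] (line.toList.length + 1) line.toList [] []) := rfl
  show Option.map _ (PySem.Chars.split? line.toList " ".toList) = _
  rw [show (" ".toList) = [' '] from rfl, key,
    pv_goOn (line.toList.length + 1) line.toList (by omega) [] []]
  simp [pvConsPre_nil _ (pvSplitAll_ne_nil line.toList)]

theorem pv_step_empty (pairs : PySem.Dict String String) : pvStep pairs "" = pairs := rfl

theorem pv_loopA_eq (fuel : Nat) (l : List Char) (h : l.length < fuel)
    (pairs : PySem.Dict String String) :
    pvLoopA fuel pairs (String.ofList l) = ((pvSplitAll l).map String.ofList).foldl pvStep pairs := by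
  induction fuel generalizing l pairs with
  | zero => omega
  | succ fuel ih =>
    cases l with
    | nil =>
      have : String.ofList ([] : List Char) = "" := rfl
      rw [this]
      simp [pvLoopA, pvSplitAll, pv_step_empty]
    | cons c rest =>
      have hne : String.ofList (c :: rest) ≠ "" := by
        intro hx
        have := congrArg String.toList hx
        simp at this
      rw [pvLoopA, if_neg hne]
      have hnw : next_word (String.ofList (c :: rest)) =
          pvPadA ((pvSp1 (String.ofList (c :: rest)).toList).map String.ofList) := by
        rw [next_word, pv_splitMax_eq]; rfl
      have htl : (String.ofList (c :: rest)).toList = c :: rest := by simp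
      rw [htl] at hnw
      rcases pvSp1_spec (c :: rest) with h1 | ⟨w, r, h2, hdec⟩
      · -- no space: one word, rest is ""
        rw [hnw, h1]
        have hpad : pvPadA [String.ofList (c :: rest)] = [String.ofList (c :: rest), ""] := by
          rw [pvPadA]; rw [if_pos (by simp)]
          rw [pvPadA]; rw [if_neg (by simp)]
          simp
        simp only [List.map, hpad]
        have hrec := ih ([] : List Char) (by simp at h ⊢; omega) (pvStep pairs (String.ofList (c :: rest)))
        have hemp : String.ofList ([] : List Char) = "" := rfl
        rw [hemp] at hrec
        show pvLoopA fuel (pvStep pairs (String.ofList (c :: rest))) "" = _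
        rw [hrec, (pvSplitAll_of_pvSp1 (c :: rest)).1 _ h1]
        simp [pvSplitAll, pv_step_empty]
      · -- first space found
        rw [hnw, h2]
        have hpad : pvPadA [String.ofList w, String.ofList r] = [String.ofList w, String.ofList r] := by
          rw [pvPadA]; rw [if_neg (by simp)]
        simp only [List.map, hpad]
        have hlen : r.length < fuel := by
          have := congrArg List.length hdec
          simp at this h
          omega
        have hrec := ih r hlen (pvStep pairs (String.ofList w))
        show pvLoopA fuel (pvStep pairs (String.ofList w)) (String.ofList r) = _
        rw [hrec, (pvSplitAll_of_pvSp1 (c :: rest)).2 w r h2]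
        simp

-- ===== VERDICT (by name: the statement is the Claim_ definition above) =====
theorem parse_line_pairs_spec : Claim_equal_parse_line_pairs := by
  intro line _
  show parse_line_pairs line = parse_line_pairs_alt line
  rw [parse_line_pairs, parse_line_pairs_alt]
  rw [pv_split_eq]
  have hloop := pv_loopA_eq (line.toList.length + 1) line.toList (by omega) PySem.Dict.empty
  rw [show String.ofList line.toList = line by simp] at hloop
  rw [hloop]
  rfl
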